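-- pv_equiv track=rewrite | github.com/hernanmd/yt | shift_srt_words.py | shift_words
-- ===== SOURCE A (Python) =====
-- def shift_words(subtitles):
--     prev_last_word = None
--     for i, sub in enumerate(subtitles):
--         # Join multi-line text for processing
--         text = ' '.join(sub['text'])
--         words = text.split()
--         if i == 0:
--             # First line: just remove the first word
--             sub['text'] = [' '.join(words[1:])]
--             prev_last_word = words[0] if words else ''
--         else:
--             # Move first word to previous line
--             if words:
--                 first_word = words[0]
--                 # Append to previous subtitle
--                 prev_text = ' '.join(subtitles[i-1]['text'])
--                 subtitles[i-1]['text'] = [prev_text + ' ' + first_word]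
--                 # Remove first word from current
--                 sub['text'] = [' '.join(words[1:])]
--     return subtitles
-- ===== SOURCE B (Python) =====
-- def shift_words(subtitles):
--     # Precompute each subtitle's word list once, then rewrite each subtitle
--     # locally with a lookahead at the next subtitle's first word.
--     words = [' '.join(s['text']).split() for s in subtitles]
--     for i, s in enumerate(subtitles):
--         own = [' '.join(words[i][1:])] if (i == 0 or words[i]) else s['text']
--         if i + 1 < len(subtitles) and words[i + 1]:
--             own = [' '.join(own) + ' ' + words[i + 1][0]]
--         s['text'] = own
--     return subtitles
-- ===== Notes on version B (the rewrite author's own statement) =====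
-- stated objective: alternative
-- what changed: A walks the list once, reading and writing back into the previous subtitle's dict as it goes; B precomputes every subtitle's word list, then rewrites each subtitle purely locally from its own words plus a lookahead at the next subtitle's first word, never touching a neighbour.
-- outside the precondition, e.g. on shift_words([{'title': ['x']}]): A raises KeyError, B raises KeyError
import Mathlib
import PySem

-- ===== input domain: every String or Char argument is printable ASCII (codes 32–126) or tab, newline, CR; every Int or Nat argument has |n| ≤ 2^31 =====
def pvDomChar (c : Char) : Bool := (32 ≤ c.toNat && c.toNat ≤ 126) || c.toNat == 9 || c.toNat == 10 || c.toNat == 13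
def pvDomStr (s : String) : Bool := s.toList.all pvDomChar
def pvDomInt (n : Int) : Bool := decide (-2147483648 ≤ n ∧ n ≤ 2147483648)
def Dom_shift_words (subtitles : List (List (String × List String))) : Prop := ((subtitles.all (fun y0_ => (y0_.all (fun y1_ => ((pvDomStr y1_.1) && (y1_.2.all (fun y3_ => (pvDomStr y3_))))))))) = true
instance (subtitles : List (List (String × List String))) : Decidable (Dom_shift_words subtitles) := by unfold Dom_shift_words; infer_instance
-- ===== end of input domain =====

-- B replaces A's single loop that writes back into the previous subtitle with a precomputed
-- word table and a purely local per-subtitle rewrite using a lookahead at the next subtitle's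
-- first word (objective: alternative decomposition, same cost).  Both Python versions mutate
-- the subtitle dicts in place and return the same list object; the theorems here are about
-- the returned value.

-- ===== PORT A =====
-- Each Python dict is an assoc list; PySem.Dict.mk/.items wrap it for the dict operations.
-- shiftStep is the loop body of A: p is the pair (i, sub) yielded by enumerate.  (The list
-- iterator yields the cell at index i, which no earlier iteration has written: iteration j
-- writes only indices j and j-1, both < i for j < i.)  In the i ≥ 1 branch the indices i-1
-- and i are non-negative, so .toNat after the pyGetD read is exact.
def shiftStep (subs : List (List (String × List String))) (p : Int × List (String × List String)) :
    List (List (String × List String)) :=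
  let i := p.1
  let sub := p.2
  let text := PySem.Str.join " " ((PySem.Dict.mk sub).getD "text" [])
  let words := PySem.Str.split₀ text
  if i == 0 then
    subs.set i.toNat (((PySem.Dict.mk sub).insert "text" [PySem.Str.join " " words.tail]).items)
  else
    match words with
    | [] => subs
    | first_word :: rest =>
      let prev := PySem.List.pyGetD subs (i - 1) []
      let prev_text := PySem.Str.join " " ((PySem.Dict.mk prev).getD "text" [])
      let subs' := subs.set (i - 1).toNat (((PySem.Dict.mk prev).insert "text" [prev_text ++ " " ++ first_word]).items)
      subs'.set i.toNat (((PySem.Dict.mk sub).insert "text" [PySem.Str.join " " rest]).items)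


def shift_words (subtitles : List (List (String × List String))) : List (List (String × List String)) :=
  (PySem.List.enumerate subtitles).foldl shiftStep subtitles

-- ===== PORT B =====
def shift_words_alt (subtitles : List (List (String × List String))) : List (List (String × List String)) :=
  let words := subtitles.map (fun s => PySem.Str.split₀ (PySem.Str.join " " ((PySem.Dict.mk s).getD "text" [])))
  (PySem.List.enumerate subtitles).map (fun p =>
    let i := p.1
    let s := p.2
    let own := if i == 0 || !((PySem.List.pyGetD words i []) == []) then
                 [PySem.Str.join " " (PySem.List.pyGetD words i []).tail]
               else (PySem.Dict.mk s).getD "text" []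
    let own := if i + 1 < (subtitles.length : Int) ∧ PySem.List.pyGetD words (i + 1) [] ≠ [] then
                 [PySem.Str.join " " own ++ " " ++ (PySem.List.pyGetD words (i + 1) []).headD ""]
               else own
    ((PySem.Dict.mk s).insert "text" own).items)

-- ===== PRECONDITION & SPEC =====
-- Pre_ excludes subtitles without a 'text' key (both Pythons raise KeyError there) and assoc
-- lists with duplicate keys, which do not represent a Python dict at all.
def Pre_shift_words (subtitles : List (List (String × List String))) : Prop :=
  ∀ s ∈ subtitles, (PySem.Dict.mk s).contains "text" = true ∧ (s.map Prod.fst).Nodup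
instance (subtitles : List (List (String × List String))) : Decidable (Pre_shift_words subtitles) := by
  unfold Pre_shift_words; infer_instance

def pvWitness_shift_words : (List (List (String × List String))) :=
  [[("text", ["hello world"]), ("id", [])], [("text", ["a b", "c"])], [("text", [""])]]

def Spec_shift_words (subtitles : List (List (String × List String))) (out : List (List (String × List String))) : Prop := out = shift_words_alt subtitles
instance (subtitles : List (List (String × List String))) (out : List (List (String × List String))) : Decidable (Spec_shift_words subtitles out) := by unfold Spec_shift_words; infer_instance

-- ===== CLAIM (what is proved, stated in full; the proofs are below) =====
def Claim_equal_shift_words : Prop := ∀ (subtitles : List (List (String × List String))), Dom_shift_words subtitles → Pre_shift_words subtitles → Spec_shift_words subtitles (shift_words subtitles)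

-- ===== LEMMAS AND PROOFS =====

-- pvBase j s is the subtitle after its own trimming step (index 0 always trims, a wordless
-- later subtitle is untouched), pvFin additionally appends the next subtitle's first word,
-- and pvMid subs k is the loop state of A after k iterations: the first k entries rewritten
-- (entry k-1 still awaiting the append from entry k), the rest original.
def pvWords (s : List (String × List String)) : List String :=
  PySem.Str.split₀ (PySem.Str.join " " ((PySem.Dict.mk s).getD "text" []))
def pvIns (s : List (String × List String)) (v : List String) : List (String × List String) :=
  ((PySem.Dict.mk s).insert "text" v).items
def pvTrim (s : List (String × List String)) : List (String × List String) :=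
  pvIns s [PySem.Str.join " " (pvWords s).tail]
def pvBase (j : Nat) (s : List (String × List String)) : List (String × List String) :=
  if j = 0 then pvTrim s else if pvWords s = [] then s else pvTrim s
def pvApp (t : List (String × List String)) (w : String) : List (String × List String) :=
  pvIns t [PySem.Str.join " " ((PySem.Dict.mk t).getD "text" []) ++ " " ++ w]
def pvFin (j : Nat) (s : List (String × List String)) (next? : Option (List (String × List String))) :
    List (String × List String) :=
  match next? with
  | none => pvBase j s
  | some s' =>
    match pvWords s' with
    | [] => pvBase j s
    | w :: _ => pvApp (pvBase j s) w
def pvF (subs : List (List (String × List String))) (k j : Nat) : List (String × List String) :=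
  pvFin j (subs.getD j []) (if j + 1 < k then some (subs.getD (j + 1) []) else none)
def pvMid (subs : List (List (String × List String))) (k : Nat) : List (List (String × List String)) :=
  (List.range k).map (pvF subs k) ++ subs.drop k


lemma pvF_stable (subs : List (List (String × List String))) {j k k' : Nat}
    (h1 : j + 1 < k) (h2 : j + 1 < k') : pvF subs k j = pvF subs k' j := by
  simp [pvF, h1, h2]

lemma pvFin_next_empty (j : Nat) (s s' : List (String × List String)) (h : pvWords s' = []) :
    pvFin j s (some s') = pvFin j s none := by
  simp [pvFin, h]

lemma pvSetSet (M D : List (List (String × List String))) (d0 : List (String × List String))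
    (D' : List (List (String × List String))) (x y : List (String × List String)) (k : Nat)
    (hM : M.length = k) (hk : 1 ≤ k) (hD : D = d0 :: D') :
    ((M ++ D).set (k - 1) x).set k y = M.set (k - 1) x ++ (y :: D') := by
  rw [List.set_append, if_pos (by omega)]
  rw [List.set_append, if_neg (by simp; omega)]
  rw [show k - (M.set (k-1) x).length = 0 from by simp; omega, hD, List.set_cons_zero]

lemma pvStep_mid (subs : List (List (String × List String))) (k : Nat) (hk : k < subs.length) :
    shiftStep (pvMid subs k) ((k : Int), subs[k]) = pvMid subs (k + 1) := by
  rcases Nat.eq_zero_or_pos k with h0 | hpos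
  · subst h0
    cases subs with
    | nil => simp at hk
    | cons a t =>
      simp [shiftStep, pvMid, pvF, pvFin, pvBase, pvTrim, pvIns, pvWords]
  · have hkne : ((k : Int) == 0) = false := by simp; omega
    have hlen : ((List.range k).map (pvF subs k)).length = k := by simp
    have hdropk : subs.drop k = subs[k] :: subs.drop (k + 1) := List.drop_eq_getElem_cons hk
    have hgetk : subs.getD k [] = subs[k] := List.getD_eq_getElem subs [] hk
    have hFk1 : ∀ j, j < k → pvF subs (k + 1) j = (if j + 1 = k then pvFin j (subs.getD j []) (some subs[k]) else pvF subs k j) := by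
      intro j hj
      by_cases hj1 : j + 1 < k
      · rw [if_neg (by omega)]; exact (pvF_stable subs (by omega) (by omega)).symm
      · have : j + 1 = k := by omega
        rw [if_pos this, pvF, if_pos (by omega), this, hgetk]
    rcases hw : pvWords subs[k] with _ | ⟨w, rest⟩
    · -- current subtitle has no words: the step leaves the state unchanged
      have hstep : shiftStep (pvMid subs k) ((k : Int), subs[k]) = pvMid subs k := by
        simp only [shiftStep, hkne, Bool.false_eq_true, if_false]
        rw [show PySem.Str.split₀ (PySem.Str.join " " ((PySem.Dict.mk subs[k]).getD "text" [])) = pvWords subs[k] from rfl, hw]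
      rw [hstep]
      unfold pvMid
      rw [List.range_succ, List.map_append, hdropk, List.append_assoc]
      congr 1
      · apply List.map_congr_left
        intro j hj
        rw [List.mem_range] at hj
        rw [hFk1 j hj]
        by_cases hj1 : j + 1 = k
        · rw [if_pos hj1, pvFin_next_empty _ _ _ hw, pvF, if_neg (by omega)]
        · rw [if_neg hj1]
      · have : pvF subs (k + 1) k = subs[k] := by
          simp only [pvF, if_neg (by omega : ¬ k + 1 < k + 1), pvFin, pvBase,
            if_neg (by omega : ¬ k = 0), hgetk, hw]
          simp
        simp only [List.map_cons, List.map_nil, List.singleton_append, this]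
    · -- current subtitle has words: append its first word to the previous entry, trim current
      have hprev : PySem.List.pyGetD (pvMid subs k) ((k : Int) - 1) [] = pvF subs k (k - 1) := by
        rw [show ((k:Int) - 1) = ((k - 1 : Nat) : Int) from by omega, PySem.List.pyGetD_natCast]
        unfold pvMid
        rw [List.getD_append _ _ _ _ (by omega : k - 1 < ((List.range k).map (pvF subs k)).length),
            PySem.List.getD_map_range _ _ _ _ (by omega)]
      have hstep1 : shiftStep (pvMid subs k) ((k : Int), subs[k])
          = (((List.range k).map (pvF subs k) ++ subs.drop k).set (k - 1) (pvApp (pvF subs k (k - 1)) w)).set k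
              (pvIns subs[k] [PySem.Str.join " " rest]) := by
        simp only [shiftStep, hkne, Bool.false_eq_true, if_false]
        rw [show PySem.Str.split₀ (PySem.Str.join " " ((PySem.Dict.mk subs[k]).getD "text" [])) = pvWords subs[k] from rfl, hw]
        rw [hprev, show ((k:Int) - 1).toNat = k - 1 from by omega, show ((k:Int)).toNat = k from by omega]
        rfl
      rw [hstep1, pvSetSet _ _ subs[k] (subs.drop (k+1)) _ _ k hlen hpos hdropk]
      unfold pvMid
      rw [List.range_succ, List.map_append, List.append_assoc]
      congr 1
      · -- the left part with the modified previous entry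
        rw [show k = (k - 1) + 1 from by omega, List.range_succ, List.map_append, List.map_append,
            List.set_append, if_neg (by simp)]
        simp only [show k - 1 + 1 = k from by omega, List.map_cons, List.map_nil,
          List.length_map, List.length_range]
        rw [show k - 1 - (k - 1) = 0 from by omega, List.set_cons_zero]
        congr 1
        · apply List.map_congr_left
          intro j hj
          rw [List.mem_range] at hj
          rw [hFk1 j (by omega), if_neg (by omega)]
        · rw [hFk1 (k-1) (by omega), if_pos (by omega)]
          rw [show pvFin (k-1) (subs.getD (k-1) []) (some subs[k])
              = pvApp (pvBase (k-1) (subs.getD (k-1) [])) w from by rw [pvFin, hw]]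
          rw [show pvF subs k (k-1) = pvBase (k-1) (subs.getD (k-1) []) from by
            rw [pvF, if_neg (by omega), pvFin]]
      · have : pvF subs (k + 1) k = pvIns subs[k] [PySem.Str.join " " rest] := by
          simp only [pvF, if_neg (by omega : ¬ k + 1 < k + 1), pvFin, pvBase,
            if_neg (by omega : ¬ k = 0), hgetk, hw]
          rw [if_neg (by simp), pvTrim, hw]
          rfl
        simp only [List.map_cons, List.map_nil, List.singleton_append, this]


lemma pvFoldl_mid (subs : List (List (String × List String))) (k : Nat) (hk : k ≤ subs.length) :
    ((PySem.List.enumerate subs).take k).foldl shiftStep subs = pvMid subs k := by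
  induction k with
  | zero => simp [pvMid]
  | succ k ih =>
    have hk' : k < subs.length := by omega
    have htake : (PySem.List.enumerate subs).take (k + 1)
        = (PySem.List.enumerate subs).take k ++ [((k : Int), subs[k])] := by
      rw [List.take_add_one, PySem.List.getElem?_enumerate]
      simp [List.getElem?_eq_getElem hk']
    rw [htake, List.foldl_append, ih (by omega), List.foldl_cons, List.foldl_nil,
        pvStep_mid subs k hk']

lemma pvIns_pvIns (s : List (String × List String)) (v w : List String) :
    pvIns (pvIns s v) w = pvIns s w := by
  unfold pvIns
  rw [show PySem.Dict.mk (((PySem.Dict.mk s).insert "text" v).items) = (PySem.Dict.mk s).insert "text" v from rfl,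
      PySem.Dict.insert_insert_self]

lemma pvGetD_pvIns (s : List (String × List String)) (v : List String) :
    (PySem.Dict.mk (pvIns s v)).getD "text" [] = v := by
  unfold pvIns
  rw [show PySem.Dict.mk (((PySem.Dict.mk s).insert "text" v).items) = (PySem.Dict.mk s).insert "text" v from rfl,
      PySem.Dict.getD_insert_self]

lemma pvMapKeep (t : List (String × List String)) (c : String × List String) (h : "text" ∉ t.map Prod.fst) :
    t.map (fun p => if p.1 == "text" then c else p) = t := by
  induction t with
  | nil => rfl
  | cons a t ih =>
    simp only [List.map_cons, List.mem_cons, not_or] at h ⊢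
    rw [if_neg (by simp only [beq_iff_eq]; exact fun hx => h.1 hx.symm), ih h.2]

lemma pvMapSelf (s : List (String × List String)) :
    (PySem.Dict.mk s).contains "text" = true → (s.map Prod.fst).Nodup →
    s.map (fun p => if p.1 == "text" then ("text", (PySem.Dict.mk s).getD "text" []) else p) = s := by
  induction s with
  | nil => intro _ _; rfl
  | cons a t ih =>
    intro hc hnd
    simp only [List.map_cons, List.nodup_cons] at hnd ⊢
    by_cases ha : a.1 = "text"
    · have hv : (PySem.Dict.mk (a :: t)).getD "text" [] = a.2 := by
        rw [PySem.Dict.getD_eq_get?_getD, show (a :: t) = ((a.1, a.2) :: t) from by simp,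
            PySem.Dict.get?_mk_cons, if_pos (by simp [ha])]
        rfl
      rw [hv, if_pos (by simp [ha]), show ("text", a.2) = a from by rw [← ha]]
      rw [pvMapKeep t a (ha ▸ hnd.1)]
    · have hv : (PySem.Dict.mk (a :: t)).getD "text" [] = (PySem.Dict.mk t).getD "text" [] := by
        rw [PySem.Dict.getD_eq_get?_getD, show (a :: t) = ((a.1, a.2) :: t) from by simp,
            PySem.Dict.get?_mk_cons, if_neg (by simp [ha]), ← PySem.Dict.getD_eq_get?_getD]
      have hc' : (PySem.Dict.mk t).contains "text" = true := by
        rw [PySem.Dict.contains_mk] at hc ⊢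
        simpa [List.any_cons, ha] using hc
      rw [hv, if_neg (by simp [ha]), ih hc' hnd.2]

lemma pvIns_self (s : List (String × List String)) (hc : (PySem.Dict.mk s).contains "text" = true)
    (hnd : (s.map Prod.fst).Nodup) :
    pvIns s ((PySem.Dict.mk s).getD "text" []) = s := by
  unfold pvIns
  rw [PySem.Dict.items_insert_of_contains _ _ hc]
  exact pvMapSelf s hc hnd

lemma pvA_eq_mid (subs : List (List (String × List String))) :
    shift_words subs = pvMid subs subs.length := by
  unfold shift_words
  rw [← List.take_of_length_le (le_of_eq (PySem.List.length_enumerate subs 0))]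
  exact pvFoldl_mid subs subs.length le_rfl

set_option maxHeartbeats 1000000 in
lemma pvB_eq_mid (subs : List (List (String × List String))) (h : Pre_shift_words subs) :
    shift_words_alt subs = pvMid subs subs.length := by
  unfold shift_words_alt pvMid
  rw [List.drop_length, List.append_nil]
  rw [PySem.List.enumerate_eq_map_pyRange subs [], show PySem.List.len subs = ((subs.length : Nat) : Int) from rfl,
      PySem.List.pyRange_zero_natCast, List.map_map, List.map_map]
  apply List.map_congr_left
  intro j hj
  rw [List.mem_range] at hj
  have hs : subs.getD j [] = subs[j] := List.getD_eq_getElem subs [] hj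
  have hsj : subs[j] ∈ subs := List.getElem_mem hj
  obtain ⟨hc, hnd⟩ := h _ hsj
  simp only [Function.comp]
  rw [PySem.List.pyGetD_natCast subs j [], hs]
  have hlenW : (subs.map (fun s => PySem.Str.split₀ (PySem.Str.join " " ((PySem.Dict.mk s).getD "text" [])))).length = subs.length := by simp
  have hWj : PySem.List.pyGetD (subs.map (fun s => PySem.Str.split₀ (PySem.Str.join " " ((PySem.Dict.mk s).getD "text" [])))) (↑j) [] = pvWords subs[j] := by
    rw [PySem.List.pyGetD_natCast, List.getD_eq_getElem _ _ (by rw [hlenW]; omega), List.getElem_map]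
    rfl
  have hown : (if (((j:Int) == 0) || !(pvWords subs[j] == [])) = true then [PySem.Str.join " " (pvWords subs[j]).tail]
      else (PySem.Dict.mk subs[j]).getD "text" []) = (PySem.Dict.mk (pvBase j subs[j])).getD "text" [] := by
    unfold pvBase
    by_cases hj0 : j = 0
    · rw [if_pos (by simp [hj0]), if_pos hj0, pvTrim, pvGetD_pvIns]
    · rw [if_neg hj0]
      rcases hwj : pvWords subs[j] with _ | ⟨w0, r0⟩
      · rw [if_neg (by simp [hj0]), if_pos rfl]
      · rw [if_pos (by simp), if_neg (by simp), pvTrim, pvGetD_pvIns, hwj]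
  have hins : ∀ v, ((PySem.Dict.mk subs[j]).insert "text" v).items = pvIns (pvBase j subs[j]) v := by
    intro v
    unfold pvBase
    by_cases hj0 : j = 0
    · rw [if_pos hj0, pvTrim, pvIns_pvIns]; rfl
    · rw [if_neg hj0]
      rcases hwj : pvWords subs[j] with _ | ⟨w0, r0⟩
      · rw [if_pos rfl]; rfl
      · rw [if_neg (by simp), pvTrim, pvIns_pvIns]; rfl
  have hbc : (PySem.Dict.mk (pvBase j subs[j])).contains "text" = true := by
    unfold pvBase pvTrim pvIns
    split <;> [skip; split] <;>
      first
        | exact hc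
        | exact PySem.Dict.contains_insert_self _ _ _
  have hbnd : ((pvBase j subs[j]).map Prod.fst).Nodup := by
    unfold pvBase pvTrim pvIns
    split <;> [skip; split] <;>
      first
        | exact hnd
        | exact PySem.Dict.nodup_keys_insert _ _ _ hnd
  rw [hWj, hown, hins]
  by_cases hn : j + 1 < subs.length
  · have hWj1 : PySem.List.pyGetD (subs.map (fun s => PySem.Str.split₀ (PySem.Str.join " " ((PySem.Dict.mk s).getD "text" [])))) ((j:Int) + 1) [] = pvWords subs[j+1] := by
      rw [show ((j:Int) + 1) = ((j+1 : Nat) : Int) from by omega, PySem.List.pyGetD_natCast,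
          List.getD_eq_getElem _ _ (by rw [hlenW]; omega), List.getElem_map]
      rfl
    rw [hWj1]
    simp only [pvF, if_pos hn, pvFin, hs, List.getD_eq_getElem subs [] hn]
    rcases hw1 : pvWords subs[j+1] with _ | ⟨w, rest⟩
    · rw [if_neg (by simp)]
      exact pvIns_self _ hbc hbnd
    · rw [if_pos (And.intro (by omega) (by simp))]
      rfl
  · have hWj1 : PySem.List.pyGetD (subs.map (fun s => PySem.Str.split₀ (PySem.Str.join " " ((PySem.Dict.mk s).getD "text" [])))) ((j:Int) + 1) [] = [] := by
      rw [show ((j:Int) + 1) = ((j+1 : Nat) : Int) from by omega, PySem.List.pyGetD_natCast,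
          List.getD_eq_default _ _ (by rw [hlenW]; omega)]
    rw [hWj1]
    simp only [pvF, if_neg hn, pvFin, hs]
    rw [if_neg (by intro hcon; exact hcon.2 rfl)]
    exact pvIns_self _ hbc hbnd

-- ===== VERDICT (by name: the statement is the Claim_ definition above) =====
theorem shift_words_spec : Claim_equal_shift_words := by
  intro subs _ hpre
  unfold Spec_shift_words
  rw [pvA_eq_mid, pvB_eq_mid subs hpre]
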